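-- pv_equiv track=rewrite | github.com/manwar/perlweeklychallenge-club | challenge-128/lubos-kolouch/python/ch-1.py | max_submatrix
-- ===== SOURCE A (Python) =====
-- def max_submatrix(matrix):
--     max_area = 0
--     max_i = max_j = max_width = max_height = 0
--
--     for i, row in enumerate(matrix):
--         for j, cell in enumerate(row):
--             if cell != 0:
--                 continue
--
--             width = 1
--             height = 1
--
--             while i + height < len(matrix) and matrix[i + height][j] == 0:
--                 height += 1
--
--             while j + width < len(row) and all_zeros(matrix, i, j, height, width):
--                 width += 1
--
--             area = width * height
--
--             if area > max_area:
--                 max_area = area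
--                 max_i, max_j, max_width, max_height = i, j, width, height
--
--     return [
--         row[max_j : max_j + max_width] for row in matrix[max_i : max_i + max_height]
--     ]
--
-- def all_zeros(matrix, i, j, height, width):
--     return all(matrix[k][j + width] == 0 for k in range(i, i + height))
-- ===== SOURCE B (Python) =====
-- def max_submatrix(matrix):
--     # Build, bottom-up, the table of down-run lengths (number of consecutive
--     # zeros from each cell downwards); then each cell's best rectangle is its
--     # down-run times the number of consecutive columns to the right whose
--     # down-run is at least as large.
--     runs = []
--     below = []
--     for row in reversed(matrix):
--         below = [((below[j] if j < len(below) else 0) + 1) if v == 0 else 0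
--                  for j, v in enumerate(row)]
--         runs.append(below)
--     runs.reverse()
--
--     max_area = 0
--     max_i = max_j = max_width = max_height = 0
--     for i, hr in enumerate(runs):
--         for j, hij in enumerate(hr):
--             if hij == 0:
--                 continue
--             width = 1
--             while j + width < len(hr) and hr[j + width] >= hij:
--                 width += 1
--             area = width * hij
--             if area > max_area:
--                 max_area = area
--                 max_i, max_j, max_width, max_height = i, j, width, hij
--     return [
--         row[max_j : max_j + max_width] for row in matrix[max_i : max_i + max_height]
--     ]
-- ===== Notes on version B (the rewrite author's own statement) =====
-- stated objective: alternative
-- what changed: B precomputes a bottom-up table of down-run lengths (consecutive zeros below each cell) once, so A's per-cell downward height scan and the repeated all_zeros column scans inside the width loop disappear: each cell's width is found by comparing precomputed table entries rightward (O(n m^2) worst case vs A's O(n^2 m^2), though not measurably faster on the generated timing inputs).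
-- outside the precondition, e.g. on max_submatrix([[1, 0], [1, 1], [1]]): A returns [[0]], B returns [[0]]; on max_submatrix([[0, 0], [1, 1, 1], []]): A returns [[0, 0]], B returns [[0, 0]]
import Mathlib
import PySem

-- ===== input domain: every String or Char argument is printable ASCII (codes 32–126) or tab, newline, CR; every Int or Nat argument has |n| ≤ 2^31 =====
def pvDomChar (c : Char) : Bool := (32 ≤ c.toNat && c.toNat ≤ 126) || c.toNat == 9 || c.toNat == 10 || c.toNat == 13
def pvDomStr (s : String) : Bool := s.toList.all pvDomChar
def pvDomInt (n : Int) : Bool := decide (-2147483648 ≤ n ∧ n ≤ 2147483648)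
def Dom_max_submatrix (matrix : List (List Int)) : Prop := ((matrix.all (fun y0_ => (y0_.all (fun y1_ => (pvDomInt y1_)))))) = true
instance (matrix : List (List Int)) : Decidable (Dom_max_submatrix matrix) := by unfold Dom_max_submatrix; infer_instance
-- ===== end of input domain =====

-- B replaces A's per-cell downward rescans (height loop + all_zeros column scans) by a
-- down-run table computed once bottom-up, so each cell only compares table entries rightward.

-- ===== PORT A =====
-- helper all_zeros(matrix, i, j, height, width)
def pyAllZeros (mat : List (List Int)) (i j hgt w : Nat) : Bool :=
  (PySem.List.pyRange (i : Int) ((i : Int) + (hgt : Int)) 1).all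
    (fun k => PySem.List.pyGetD (PySem.List.pyGetD mat k []) ((j : Int) + (w : Int)) 1 == 0)

-- while i + height < len(matrix) and matrix[i + height][j] == 0: height += 1
def heightA (mat : List (List Int)) (i j h : Nat) : Nat :=
  if hc : i + h < mat.length ∧
      PySem.List.pyGetD (PySem.List.pyGetD mat ((i + h : Nat) : Int) []) ((j : Nat) : Int) 1 = 0 then
    heightA mat i j (h + 1)
  else h
termination_by mat.length - (i + h)
decreasing_by omega

-- while j + width < len(row) and all_zeros(matrix, i, j, height, width): width += 1
def widthA (mat : List (List Int)) (row : List Int) (i j hgt w : Nat) : Nat :=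
  if hc : j + w < row.length ∧ pyAllZeros mat i j hgt w = true then
    widthA mat row i j hgt (w + 1)
  else w
termination_by row.length - (j + w)
decreasing_by omega

-- for j, cell in enumerate(row): …  (j carried as the counter)
def innerA (mat : List (List Int)) (i : Nat) (row : List Int) :
    List Int → (Nat × Nat × Nat × Nat × Nat) → Nat → (Nat × Nat × Nat × Nat × Nat)
  | [], s, _ => s
  | cell :: rest, s, j =>
    if cell ≠ 0 then
      innerA mat i row rest s (j + 1)
    else
      let hgt := heightA mat i j 1
      let wdt := widthA mat row i j hgt 1
      let area := wdt * hgt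
      innerA mat i row rest (if area > s.1 then (area, i, j, wdt, hgt) else s) (j + 1)

-- for i, row in enumerate(matrix): …
def outerA (mat : List (List Int)) :
    List (List Int) → (Nat × Nat × Nat × Nat × Nat) → Nat → (Nat × Nat × Nat × Nat × Nat)
  | [], s, _ => s
  | row :: rest, s, i => outerA mat rest (innerA mat i row row s 0) (i + 1)

def max_submatrix (matrix : List (List Int)) : List (List Int) :=
  let st := outerA matrix matrix (0, 0, 0, 0, 0) 0
  (PySem.List.slice matrix (some (st.2.1 : Int)) (some ((st.2.1 : Int) + (st.2.2.2.2 : Int)))).map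
    (fun row => PySem.List.slice row (some (st.2.2.1 : Int)) (some ((st.2.2.1 : Int) + (st.2.2.2.1 : Int))))

-- ===== PORT B =====
-- the comprehension building one row of the table (j carried as the counter)
def runRow (below : List Nat) : List Int → Nat → List Nat
  | [], _ => []
  | v :: vs, j =>
    (if v = 0 then (if j < below.length then below.getD j 0 else 0) + 1 else 0) :: runRow below vs (j + 1)

-- runs = []; below = []; for row in reversed(matrix): below = [...]; runs.append(below); runs.reverse()
def runsBuild (matrix : List (List Int)) : List (List Nat) :=
  ((matrix.reverse.foldl
      (fun (acc : List (List Nat) × List Nat) row =>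
        let cur := runRow acc.2 row 0
        (acc.1 ++ [cur], cur))
      ([], [])).1).reverse

-- while j + width < len(hr) and hr[j + width] >= hij: width += 1
def widthB (hr : List Nat) (j hij w : Nat) : Nat :=
  if hc : j + w < hr.length ∧ hij ≤ hr.getD (j + w) 0 then widthB hr j hij (w + 1) else w
termination_by hr.length - (j + w)
decreasing_by omega

-- for j, hij in enumerate(hr): …
def innerB (i : Nat) (hr : List Nat) :
    List Nat → (Nat × Nat × Nat × Nat × Nat) → Nat → (Nat × Nat × Nat × Nat × Nat)
  | [], s, _ => s
  | hij :: rest, s, j =>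
    if hij = 0 then
      innerB i hr rest s (j + 1)
    else
      let w := widthB hr j hij 1
      let area := w * hij
      innerB i hr rest (if area > s.1 then (area, i, j, w, hij) else s) (j + 1)

-- for i, hr in enumerate(runs): …
def outerB : List (List Nat) → (Nat × Nat × Nat × Nat × Nat) → Nat → (Nat × Nat × Nat × Nat × Nat)
  | [], s, _ => s
  | hr :: rest, s, i => outerB rest (innerB i hr hr s 0) (i + 1)

def max_submatrix_alt (matrix : List (List Int)) : List (List Int) :=
  let st := outerB (runsBuild matrix) (0, 0, 0, 0, 0) 0
  (PySem.List.slice matrix (some (st.2.1 : Int)) (some ((st.2.1 : Int) + (st.2.2.2.2 : Int)))).map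
    (fun row => PySem.List.slice row (some (st.2.2.1 : Int)) (some ((st.2.2.1 : Int) + (st.2.2.2.1 : Int))))

-- ===== PRECONDITION & SPEC =====
-- Pre_ excludes exactly those ragged matrices in which some zero cell lies above a later row
-- too short to hold its column: there A's downward scans can raise IndexError (and whether a
-- particular such input survives is an accident of A's scan order).
def Pre_max_submatrix (matrix : List (List Int)) : Prop :=
  List.Pairwise (fun r1 r2 => ∀ j, j < r1.length → r1.getD j 0 = 0 → j < r2.length) matrix
instance (matrix : List (List Int)) : Decidable (Pre_max_submatrix matrix) := by
  unfold Pre_max_submatrix; infer_instance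

def pvWitness_max_submatrix : List (List Int) := [[0, 0], [1, 0]]

def Spec_max_submatrix (matrix : List (List Int)) (out : List (List Int)) : Prop := out = max_submatrix_alt matrix
instance (matrix : List (List Int)) (out : List (List Int)) : Decidable (Spec_max_submatrix matrix out) := by unfold Spec_max_submatrix; infer_instance

-- ===== CLAIM (what is proved, stated in full; the proofs are below) =====
def Claim_equal_max_submatrix : Prop := ∀ (matrix : List (List Int)), Dom_max_submatrix matrix → Pre_max_submatrix matrix → Spec_max_submatrix matrix (max_submatrix matrix)

-- ===== LEMMAS AND PROOFS =====

-- proof-side recursive form of the down-run table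
def runsOf : List (List Int) → List (List Nat)
  | [] => []
  | row :: rest =>
    let r := runsOf rest
    runRow (r.headD []) row 0 :: r

theorem runsBuild_eq (mat : List (List Int)) : runsBuild mat = runsOf mat := by
  have key : ∀ rows : List (List Int),
      rows.reverse.foldl
        (fun (acc : List (List Nat) × List Nat) row =>
          let cur := runRow acc.2 row 0
          (acc.1 ++ [cur], cur))
        ([], []) = ((runsOf rows).reverse, (runsOf rows).headD []) := by
    intro rows
    induction rows with
    | nil => rfl
    | cons row rest ih =>
      rw [List.reverse_cons, List.foldl_append, ih]
      simp [runsOf]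
  unfold runsBuild
  rw [key]
  exact List.reverse_reverse _

-- down-run value read out of the table (proof-side abbreviation)
def runGet (mat : List (List Int)) (i j : Nat) : Nat := ((runsOf mat).getD i []).getD j 0

theorem length_runRow (below : List Nat) (row : List Int) : ∀ j, (runRow below row j).length = row.length := by
  induction row with
  | nil => intro j; simp [runRow]
  | cons v vs ih => intro j; simp [runRow, ih]

theorem getD_runRow (below : List Nat) (row : List Int) :
    ∀ j0 t, t < row.length →
      (runRow below row j0).getD t 0 = if row.getD t 0 = 0 then below.getD (j0 + t) 0 + 1 else 0 := by
  induction row with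
  | nil => intro j0 t ht; simp at ht
  | cons v vs ih =>
    intro j0 t ht
    cases t with
    | zero =>
      simp only [runRow, List.getD_cons_zero]
      by_cases hb : j0 < below.length
      · simp [hb]
      · rw [if_neg hb, List.getD_eq_default _ _ (by omega)]
    | succ t =>
      simp only [runRow, List.getD_cons_succ]
      rw [ih (j0 + 1) t (by simpa using ht)]
      ring_nf

theorem length_runsOf (mat : List (List Int)) : (runsOf mat).length = mat.length := by
  induction mat with
  | nil => rfl
  | cons row rest ih => simp [runsOf, ih]

theorem length_runsOf_getD (mat : List (List Int)) :
    ∀ i, ((runsOf mat).getD i []).length = (mat.getD i []).length := by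
  induction mat with
  | nil => intro i; rfl
  | cons row rest ih =>
    intro i
    cases i with
    | zero => simpa [runsOf] using length_runRow ((runsOf rest).headD []) row 0
    | succ i => simpa [runsOf] using ih i

theorem runGet_cons_succ (row : List Int) (rest : List (List Int)) (i j : Nat) :
    runGet (row :: rest) (i + 1) j = runGet rest i j := by
  simp [runGet, runsOf]

theorem getD_default_irrel {α : Type} (l : List α) (j : Nat) (a b : α) (h : j < l.length) :
    l.getD j a = l.getD j b := by
  rw [List.getD_eq_getElem _ _ h, List.getD_eq_getElem _ _ h]

theorem runGet_zero_of_ge (mat : List (List Int)) (i j : Nat) (h : mat.length ≤ i) :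
    runGet mat i j = 0 := by
  unfold runGet
  rw [List.getD_eq_default (runsOf mat) [] (show (runsOf mat).length ≤ i by rw [length_runsOf]; omega)]
  simp

theorem runGet_zero_col (mat : List (List Int)) (i j : Nat)
    (hj : (mat.getD i []).length ≤ j) : runGet mat i j = 0 := by
  unfold runGet
  rw [List.getD_eq_default ((runsOf mat).getD i []) 0
    (show ((runsOf mat).getD i []).length ≤ j by rw [length_runsOf_getD]; omega)]

theorem headD_eq_getD {α : Type} (l : List (List α)) : l.headD [] = l.getD 0 [] := by
  cases l <;> rfl

theorem runGet_succ_eq (mat : List (List Int)) (i j : Nat)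
    (hi : i < mat.length) (hj : j < (mat.getD i []).length) :
    runGet mat i j = if (mat.getD i []).getD j 0 = 0 then runGet mat (i + 1) j + 1 else 0 := by
  induction mat generalizing i with
  | nil => simp at hi
  | cons row rest ih =>
    cases i with
    | zero =>
      have hj' : j < row.length := by simpa using hj
      show (runRow ((runsOf rest).headD []) row 0).getD j 0 = _
      rw [getD_runRow _ _ 0 j hj']
      rw [runGet_cons_succ]
      rw [headD_eq_getD]
      simp [runGet]
    | succ i =>
      have hi' : i < rest.length := by simpa using hi
      have hj' : j < (rest.getD i []).length := by simpa using hj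
      rw [runGet_cons_succ, runGet_cons_succ, ih i hi' hj']
      simp

theorem runGet_le (mat : List (List Int)) : ∀ i j, runGet mat i j ≤ mat.length - i := by
  induction mat with
  | nil => intro i j; simp [runGet, runsOf]
  | cons row rest ih =>
    intro i j
    cases i with
    | zero =>
      by_cases hj : j < row.length
      · rw [runGet_succ_eq _ 0 j (by simp) (by simpa using hj)]
        split
        · rw [runGet_cons_succ]
          have := ih 0 j
          simp only [List.length_cons]
          omega
        · omega
      · rw [runGet_zero_col _ 0 j (by simpa using (by omega : row.length ≤ j))]
        omega
    | succ i =>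
      rw [runGet_cons_succ]
      have := ih i j
      simp only [List.length_cons]
      omega

theorem pre_lower (mat : List (List Int)) (hpre : Pre_max_submatrix mat)
    {i k j : Nat} (hik : i < k) (hk : k < mat.length)
    (hj : j < (mat.getD i []).length) (hz : (mat.getD i []).getD j 0 = 0) :
    j < (mat.getD k []).length := by
  have hi : i < mat.length := lt_trans hik hk
  rw [List.getD_eq_getElem _ _ hi] at hj hz
  rw [List.getD_eq_getElem _ _ hk]
  exact List.pairwise_iff_getElem.mp hpre i k hi hk hik j hj hz

theorem runGet_ge_iff (mat : List (List Int)) (j : Nat) :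
    ∀ h i, i < mat.length → j < (mat.getD i []).length →
      (∀ k, i < k → k < mat.length → j < (mat.getD k []).length) →
      (h ≤ runGet mat i j ↔
        ∀ t, t < h → i + t < mat.length ∧ (mat.getD (i + t) []).getD j 0 = 0) := by
  intro h
  induction h with
  | zero => intro i _ _ _; simp
  | succ h ih =>
    intro i hi hj hlow
    rw [runGet_succ_eq mat i j hi hj]
    by_cases hz : (mat.getD i []).getD j 0 = 0
    · rw [if_pos hz]
      constructor
      · intro hle t ht
        cases t with
        | zero => exact ⟨by omega, by simpa using hz⟩
        | succ t =>
          by_cases hi1 : i + 1 < mat.length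
          · have := (ih (i + 1) hi1 (hlow (i + 1) (by omega) hi1)
              (fun k hk1 hk2 => hlow k (by omega) hk2)).mp (by omega) t (by omega)
            refine ⟨by omega, ?_⟩
            have h2 := this.2
            rw [show i + 1 + t = i + (t + 1) by omega] at h2
            exact h2
          · exfalso
            have h0 : runGet mat (i + 1) j = 0 := runGet_zero_of_ge _ _ _ (by omega)
            omega
      · intro hall
        by_cases hi1 : i + 1 < mat.length
        · have : h ≤ runGet mat (i + 1) j := by
            rw [ih (i + 1) hi1 (hlow (i + 1) (by omega) hi1)
              (fun k hk1 hk2 => hlow k (by omega) hk2)]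
            intro t ht
            have := hall (t + 1) (by omega)
            rw [show i + (t + 1) = i + 1 + t by omega] at this
            exact this
          omega
        · cases h with
          | zero => omega
          | succ h' => exact absurd (hall 1 (by omega)).1 (by omega)
    · rw [if_neg hz]
      constructor
      · intro hle; exact absurd hle (by omega)
      · intro hall; exact absurd (hall 0 (by omega)).2 hz

theorem heightA_eq (mat : List (List Int)) (i j : Nat)
    (hlow : ∀ k, i < k → k < mat.length → j < (mat.getD k []).length) :
    ∀ h, 0 < h → heightA mat i j h = h + runGet mat (i + h) j := by
  have key : ∀ fuel h, 0 < h → mat.length - (i + h) ≤ fuel →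
      heightA mat i j h = h + runGet mat (i + h) j := by
    intro fuel
    induction fuel with
    | zero =>
      intro h hpos hf
      rw [heightA, dif_neg (by omega)]
      rw [runGet_zero_of_ge mat _ j (by omega)]
      omega
    | succ fuel ih =>
      intro h hpos hf
      rw [heightA]
      by_cases hc : i + h < mat.length ∧
          PySem.List.pyGetD (PySem.List.pyGetD mat ((i + h : Nat) : Int) []) ((j : Nat) : Int) 1 = 0
      · rw [dif_pos hc]
        obtain ⟨hlt, hz⟩ := hc
        simp only [PySem.List.pyGetD_natCast] at hz
        have hrl : j < (mat.getD (i + h) []).length := hlow (i + h) (by omega) hlt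
        have hz0 : (mat.getD (i + h) []).getD j 0 = 0 := by
          rw [getD_default_irrel _ j 0 1 (by omega)]
          exact hz
        rw [ih (h + 1) (by omega) (by omega)]
        rw [runGet_succ_eq mat (i + h) j hlt (by omega), if_pos hz0]
        have harith : i + (h + 1) = i + h + 1 := rfl
        rw [harith]
        omega
      · rw [dif_neg hc]
        by_cases hlt : i + h < mat.length
        · have hrl : j < (mat.getD (i + h) []).length := hlow (i + h) (by omega) hlt
          have hz' : ¬ PySem.List.pyGetD (PySem.List.pyGetD mat ((i + h : Nat) : Int) []) ((j : Nat) : Int) 1 = 0 :=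
            fun hb => hc ⟨hlt, hb⟩
          rw [PySem.List.pyGetD_natCast, PySem.List.pyGetD_natCast] at hz'
          rw [runGet_succ_eq mat (i + h) j hlt (by omega), if_neg (by
            rw [getD_default_irrel _ j 0 1 (by omega)]
            exact hz')]
          omega
        · rw [runGet_zero_of_ge mat _ j (by omega)]
          omega
  intro h hpos
  exact key (mat.length - (i + h)) h hpos (le_refl _)

theorem pyAllZeros_iff (mat : List (List Int)) (hpre : Pre_max_submatrix mat)
    (i j hgt w : Nat) (hi : i < mat.length) (hjw : j + w < (mat.getD i []).length)
    (hpos : 0 < hgt) (hle : i + hgt ≤ mat.length) :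
    pyAllZeros mat i j hgt w = true ↔ hgt ≤ runGet mat i (j + w) := by
  by_cases hz : (mat.getD i []).getD (j + w) 0 = 0
  · have hlow : ∀ k, i < k → k < mat.length → j + w < (mat.getD k []).length :=
      fun k hk1 hk2 => pre_lower mat hpre hk1 hk2 hjw hz
    have hall_len : ∀ t, t < hgt → j + w < (mat.getD (i + t) []).length := by
      intro t ht
      cases t with
      | zero => exact hjw
      | succ t' => exact hlow (i + (t' + 1)) (by omega) (by omega)
    rw [runGet_ge_iff mat (j + w) hgt i hi hjw hlow]
    unfold pyAllZeros
    rw [List.all_eq_true]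
    constructor
    · intro hall t ht
      have hm : ((i + t : Nat) : Int) ∈ PySem.List.pyRange (i : Int) ((i : Int) + (hgt : Int)) 1 := by
        rw [PySem.List.mem_pyRange_one]
        constructor <;> push_cast <;> omega
      have h2 := hall _ hm
      simp only [beq_iff_eq] at h2
      refine ⟨by omega, ?_⟩
      rw [show ((j : Int) + (w : Int)) = ((j + w : Nat) : Int) by push_cast; ring] at h2
      rw [PySem.List.pyGetD_natCast, PySem.List.pyGetD_natCast] at h2
      rw [getD_default_irrel _ (j + w) 0 1 (hall_len t ht)]
      exact h2
    · intro hall k hk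
      rw [PySem.List.mem_pyRange_one] at hk
      obtain ⟨hk1, hk2⟩ := hk
      have ht : (k - (i : Int)).toNat < hgt := by omega
      set t := (k - (i : Int)).toNat with htdef
      have hkeq : k = ((i + t : Nat) : Int) := by push_cast; omega
      obtain ⟨hlt, hz'⟩ := hall t ht
      rw [beq_iff_eq, hkeq]
      rw [show ((j : Int) + (w : Int)) = ((j + w : Nat) : Int) by push_cast; ring]
      rw [PySem.List.pyGetD_natCast, PySem.List.pyGetD_natCast]
      rw [getD_default_irrel _ (j + w) 1 0 (hall_len t ht)]
      exact hz'
  · have hrg : runGet mat i (j + w) = 0 := by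
      rw [runGet_succ_eq mat i (j + w) hi hjw, if_neg hz]
    apply iff_of_false
    · intro hAll
      unfold pyAllZeros at hAll
      have hm : ((i : Nat) : Int) ∈ PySem.List.pyRange (i : Int) ((i : Int) + (hgt : Int)) 1 := by
        rw [PySem.List.mem_pyRange_one]
        exact ⟨le_refl _, by omega⟩
      have h2 := List.all_eq_true.mp hAll _ hm
      simp only [beq_iff_eq] at h2
      rw [show ((j : Int) + (w : Int)) = ((j + w : Nat) : Int) by push_cast; ring] at h2
      rw [PySem.List.pyGetD_natCast, PySem.List.pyGetD_natCast] at h2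
      rw [getD_default_irrel _ (j + w) 1 0 hjw] at h2
      exact hz h2
    · omega

theorem widthA_eq (mat : List (List Int)) (hpre : Pre_max_submatrix mat)
    (i j hgt : Nat) (hi : i < mat.length)
    (hgt_eq : hgt = runGet mat i j) (hpos : 0 < hgt) :
    ∀ w, widthA mat (mat.getD i []) i j hgt w = widthB ((runsOf mat).getD i []) j hgt w := by
  have hhl : ((runsOf mat).getD i []).length = (mat.getD i []).length := length_runsOf_getD mat i
  have hle : i + hgt ≤ mat.length := by
    have := runGet_le mat i j
    omega
  have key : ∀ fuel w, (mat.getD i []).length - (j + w) ≤ fuel →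
      widthA mat (mat.getD i []) i j hgt w = widthB ((runsOf mat).getD i []) j hgt w := by
    intro fuel
    induction fuel with
    | zero =>
      intro w hf
      rw [widthA, widthB, dif_neg (by omega), dif_neg (by omega)]
    | succ fuel ih =>
      intro w hf
      by_cases hjw : j + w < (mat.getD i []).length
      · have hcond : pyAllZeros mat i j hgt w = true ↔ hgt ≤ ((runsOf mat).getD i []).getD (j + w) 0 := by
          rw [pyAllZeros_iff mat hpre i j hgt w hi hjw hpos hle]
          rfl
        rw [widthA, widthB]
        by_cases hall : pyAllZeros mat i j hgt w = true
        · rw [dif_pos ⟨by omega, hall⟩, dif_pos ⟨by omega, hcond.mp hall⟩]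
          exact ih (w + 1) (by omega)
        · rw [dif_neg (by tauto), dif_neg (by rw [hhl]; intro h; exact hall (hcond.mpr h.2))]
      · rw [widthA, widthB, dif_neg (by omega), dif_neg (by omega)]
  intro w
  exact key ((mat.getD i []).length - (j + w)) w (le_refl _)

theorem inner_eq (mat : List (List Int)) (hpre : Pre_max_submatrix mat)
    (i : Nat) (hi : i < mat.length) :
    ∀ cells hs j s, cells = (mat.getD i []).drop j → hs = ((runsOf mat).getD i []).drop j →
      innerA mat i (mat.getD i []) cells s j = innerB i ((runsOf mat).getD i []) hs s j := by
  have hhl : ((runsOf mat).getD i []).length = (mat.getD i []).length := length_runsOf_getD mat i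
  intro cells
  induction cells with
  | nil =>
    intro hs j s hcells hhs
    have hj : (mat.getD i []).length ≤ j := by
      have hlen := congrArg List.length hcells
      rw [List.length_drop] at hlen
      simp only [List.length_nil] at hlen
      omega
    have : hs = [] := by
      rw [hhs, List.drop_eq_nil_iff]
      omega
    rw [this]
    rfl
  | cons cell rest ih =>
    intro hs j s hcells hhs
    have hj : j < (mat.getD i []).length := by
      by_contra hj
      rw [List.drop_eq_nil_iff.mpr (by omega)] at hcells
      exact List.cons_ne_nil _ _ hcells
    have hdropA := List.drop_eq_getElem_cons (show j < (mat.getD i []).length by omega)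
    rw [hdropA] at hcells
    obtain ⟨hcell, hrest⟩ : cell = (mat.getD i [])[j] ∧ rest = (mat.getD i []).drop (j + 1) := by
      constructor <;> [exact (List.cons.injEq _ _ _ _ ▸ hcells).1; exact (List.cons.injEq _ _ _ _ ▸ hcells).2]
    have hdropB := List.drop_eq_getElem_cons (show j < ((runsOf mat).getD i []).length by omega)
    rw [hdropB] at hhs
    have hijval : ((runsOf mat).getD i [])[j] = runGet mat i j := by
      unfold runGet
      exact (List.getD_eq_getElem _ _ (by omega)).symm
    have hcellD : (mat.getD i []).getD j 0 = cell := by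
      rw [List.getD_eq_getElem _ _ (by omega), hcell]
    have hrec := runGet_succ_eq mat i j hi (by omega)
    by_cases hc : cell = 0
    · -- zero cell: compute height and width
      have hz0 : (mat.getD i []).getD j 0 = 0 := by rw [hcellD, hc]
      have hlow : ∀ k, i < k → k < mat.length → j < (mat.getD k []).length :=
        fun k hk1 hk2 => pre_lower mat hpre hk1 hk2 hj hz0
      have hijpos : runGet mat i j = runGet mat (i + 1) j + 1 := by
        rw [hrec, hcellD, if_pos hc]
      have hhgt : heightA mat i j 1 = runGet mat i j := by
        rw [heightA_eq mat i j hlow 1 (by omega), hijpos]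
        omega
      have hwdt : widthA mat (mat.getD i []) i j (heightA mat i j 1) 1 =
          widthB ((runsOf mat).getD i []) j (((runsOf mat).getD i [])[j]) 1 := by
        rw [hhgt, hijval]
        exact widthA_eq mat hpre i j _ hi rfl (by omega) 1
      have hhh : heightA mat i j 1 = ((runsOf mat).getD i [])[j] := by rw [hhgt, hijval]
      rw [hhs]
      simp only [innerA, innerB]
      rw [if_neg (show ¬ cell ≠ 0 from fun hn => hn hc),
        if_neg (show ¬ ((runsOf mat).getD i [])[j] = 0 by rw [hijval]; omega)]
      rw [hwdt, hhh]
      exact ih _ (j + 1) _ hrest rfl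
    · -- nonzero cell: both skip
      have hij0 : runGet mat i j = 0 := by
        rw [hrec, hcellD, if_neg hc]
      rw [hhs]
      simp only [innerA, innerB]
      rw [if_pos (show cell ≠ 0 from hc), if_pos (show ((runsOf mat).getD i [])[j] = 0 by rw [hijval]; omega)]
      exact ih _ (j + 1) _ hrest rfl

theorem outer_eq (mat : List (List Int)) (hpre : Pre_max_submatrix mat) :
    ∀ rows rs i s, rows = mat.drop i → rs = (runsOf mat).drop i →
      outerA mat rows s i = outerB rs s i := by
  intro rows
  induction rows with
  | nil =>
    intro rs i s hrows hrs
    have : rs = [] := by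
      rw [hrs, List.drop_eq_nil_iff, length_runsOf]
      have := congrArg List.length hrows
      simp at this
      omega
    rw [this]
    rfl
  | cons row rest ih =>
    intro rs i s hrows hrs
    have hi : i < mat.length := by
      by_contra hi
      rw [List.drop_eq_nil_iff.mpr (by omega)] at hrows
      exact List.cons_ne_nil _ _ hrows
    have hdropA := List.drop_eq_getElem_cons hi
    rw [hdropA] at hrows
    have hrow : row = mat[i] := (List.cons.injEq _ _ _ _ ▸ hrows).1
    have hrest : rest = mat.drop (i + 1) := (List.cons.injEq _ _ _ _ ▸ hrows).2
    have hdropB := List.drop_eq_getElem_cons (show i < (runsOf mat).length by rw [length_runsOf]; omega)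
    rw [hdropB] at hrs
    rw [hrs]
    simp only [outerA, outerB]
    have hgetD : mat.getD i [] = mat[i] := List.getD_eq_getElem _ _ hi
    have hgetDr := List.getD_eq_getElem (runsOf mat) []
      (show i < (runsOf mat).length by rw [length_runsOf]; omega)
    have hinner := inner_eq mat hpre i hi ((mat.getD i []))
      (((runsOf mat).getD i [])) 0 s List.drop_zero.symm List.drop_zero.symm
    rw [hgetD, hgetDr] at hinner
    rw [← hrow] at hinner
    rw [hinner]
    exact ih _ (i + 1) _ hrest rfl

-- ===== VERDICT (by name: the statement is the Claim_ definition above) =====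
theorem max_submatrix_spec : Claim_equal_max_submatrix := by
  unfold Claim_equal_max_submatrix
  intro matrix _ hpre
  unfold Spec_max_submatrix
  have hst : outerA matrix matrix (0, 0, 0, 0, 0) 0 = outerB (runsOf matrix) (0, 0, 0, 0, 0) 0 :=
    outer_eq matrix hpre matrix (runsOf matrix) 0 (0, 0, 0, 0, 0)
      List.drop_zero.symm List.drop_zero.symm
  unfold max_submatrix max_submatrix_alt
  rw [runsBuild_eq, hst]
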